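-- pv_equiv track=rewrite | github.com/jmchantrein/AnKLuMe | scripts/generate-dep-scenarios.py | generate_feature
-- ===== SOURCE A (Python) =====
-- def generate_feature(pairs: list[tuple[str, str, str]]) -> str:
--     """Generate a .feature file from dependency pairs."""
--     lines = [
--         "# Auto-generated from _cli_deps.yml — do not edit manually.",
--         "# Regenerate with: python3 scripts/generate-dep-scenarios.py --write",
--         "",
--         "Feature: CLI resource dependency chains",
--         "  Each command depends on resources produced by prerequisite commands.",
--         "  Running a consumer before its producer should fail or produce errors.",
--         "",
--     ]
--
--     # Group by consumer
--     by_consumer: dict[str, list[tuple[str, str]]] = {}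
--     for consumer, producer, resource in pairs:
--         by_consumer.setdefault(consumer, []).append((producer, resource))
--
--     for consumer, deps in sorted(by_consumer.items()):
--         producers_list = ", ".join(sorted(set(p for p, _ in deps)))
--         resources_list = ", ".join(sorted(set(r for _, r in deps)))
--         lines.append(f"  Scenario: {consumer} depends on {producers_list}")
--         lines.append(f"    # Resources needed: {resources_list}")
--         lines.append(f"    # Producers: {producers_list}")
--         lines.append("    Given a clean sandbox environment")
--         lines.append(f"    # {consumer} requires {len(deps)} prerequisite(s)")
--         lines.append("")
--
--     return "\n".join(lines)
-- ===== SOURCE B (Python) =====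
-- def generate_feature(pairs: list[tuple[str, str, str]]) -> str:
--     """Generate a .feature file from dependency pairs."""
--     header = [
--         "# Auto-generated from _cli_deps.yml — do not edit manually.",
--         "# Regenerate with: python3 scripts/generate-dep-scenarios.py --write",
--         "",
--         "Feature: CLI resource dependency chains",
--         "  Each command depends on resources produced by prerequisite commands.",
--         "  Running a consumer before its producer should fail or produce errors.",
--         "",
--     ]
--     scenarios = []
--     for consumer in sorted({c for c, _, _ in pairs}):
--         producers_list = ", ".join(sorted({p for c, p, _ in pairs if c == consumer}))
--         resources_list = ", ".join(sorted({r for c, _, r in pairs if c == consumer}))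
--         count = sum(1 for c, _, _ in pairs if c == consumer)
--         scenarios += [
--             f"  Scenario: {consumer} depends on {producers_list}",
--             f"    # Resources needed: {resources_list}",
--             f"    # Producers: {producers_list}",
--             "    Given a clean sandbox environment",
--             f"    # {consumer} requires {count} prerequisite(s)",
--             "",
--         ]
--     return "\n".join(header + scenarios)
-- ===== Notes on version B (the rewrite author's own statement) =====
-- stated objective: simpler
-- what changed: B drops A's dict accumulation and items sort: it iterates over the sorted set of distinct consumers and computes each scenario's producer set, resource set and prerequisite count directly by filtering the pairs list per consumer.
import Mathlib
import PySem

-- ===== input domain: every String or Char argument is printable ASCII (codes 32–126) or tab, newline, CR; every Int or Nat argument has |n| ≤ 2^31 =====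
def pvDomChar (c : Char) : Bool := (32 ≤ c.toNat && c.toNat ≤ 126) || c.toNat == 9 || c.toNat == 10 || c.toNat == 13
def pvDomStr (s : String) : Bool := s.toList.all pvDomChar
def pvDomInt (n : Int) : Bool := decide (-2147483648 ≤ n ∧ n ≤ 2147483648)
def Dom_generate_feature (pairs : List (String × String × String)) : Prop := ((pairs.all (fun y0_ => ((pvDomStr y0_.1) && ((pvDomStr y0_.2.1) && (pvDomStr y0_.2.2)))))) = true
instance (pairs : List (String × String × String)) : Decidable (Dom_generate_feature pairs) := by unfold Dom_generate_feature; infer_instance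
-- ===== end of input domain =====

-- B replaces A's dict-grouping pass by a loop over the sorted set of distinct consumers with per-consumer
-- filters of the pairs list (objective: simpler). Equality proved on all inputs.

-- ===== PORT A =====
def pvHeader : List String := [
  "# Auto-generated from _cli_deps.yml — do not edit manually.",
  "# Regenerate with: python3 scripts/generate-dep-scenarios.py --write",
  "",
  "Feature: CLI resource dependency chains",
  "  Each command depends on resources produced by prerequisite commands.",
  "  Running a consumer before its producer should fail or produce errors.",
  ""]

def generate_feature (pairs : List (String × String × String)) : String :=
  -- by_consumer.setdefault(consumer, []).append((producer, resource)) ≡ modify consumer [] (· ++ [(producer, resource)]); (producer, resource) is t.2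
  let by_consumer : PySem.Dict String (List (String × String)) :=
    pairs.foldl (fun d t => d.modify t.1 [] (· ++ [t.2])) PySem.Dict.empty
  -- sorted(by_consumer.items()): dict keys are distinct, so Python's tuple comparison is decided by the key alone
  let itemsSorted := PySem.List.sorted by_consumer.items (fun kv => kv.1) false
  let lines := itemsSorted.foldl (fun acc kv =>
    let consumer := kv.1
    let deps := kv.2
    let producers_list := PySem.Str.join ", " (PySem.List.sorted (PySem.Set.ofList (deps.map (fun d => d.1))) (fun x => x) false)
    let resources_list := PySem.Str.join ", " (PySem.List.sorted (PySem.Set.ofList (deps.map (fun d => d.2))) (fun x => x) false)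
    acc ++ ["  Scenario: " ++ consumer ++ " depends on " ++ producers_list,
            "    # Resources needed: " ++ resources_list,
            "    # Producers: " ++ producers_list,
            "    Given a clean sandbox environment",
            "    # " ++ consumer ++ " requires " ++ PySem.Int.toStr (deps.length : Int) ++ " prerequisite(s)",
            ""]) pvHeader
  PySem.Str.join "\n" lines

-- ===== PORT B =====
def generate_feature_alt (pairs : List (String × String × String)) : String :=
  let scenarios := (PySem.List.sorted (PySem.Set.ofList (pairs.map (fun t => t.1))) (fun x => x) false).flatMap
    (fun consumer =>
      let producers_list := PySem.Str.join ", " (PySem.List.sorted (PySem.Set.ofList ((pairs.filter (fun t => t.1 == consumer)).map (fun t => t.2.1))) (fun x => x) false)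
      let resources_list := PySem.Str.join ", " (PySem.List.sorted (PySem.Set.ofList ((pairs.filter (fun t => t.1 == consumer)).map (fun t => t.2.2))) (fun x => x) false)
      -- sum(1 for c, _, _ in pairs if c == consumer)
      let count := pairs.countP (fun t => t.1 == consumer)
      ["  Scenario: " ++ consumer ++ " depends on " ++ producers_list,
       "    # Resources needed: " ++ resources_list,
       "    # Producers: " ++ producers_list,
       "    Given a clean sandbox environment",
       "    # " ++ consumer ++ " requires " ++ PySem.Int.toStr (count : Int) ++ " prerequisite(s)",
       ""])
  PySem.Str.join "\n" (pvHeader ++ scenarios)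

-- ===== PRECONDITION & SPEC =====
def Spec_generate_feature (pairs : List (String × String × String)) (out : String) : Prop := out = generate_feature_alt pairs
instance (pairs : List (String × String × String)) (out : String) : Decidable (Spec_generate_feature pairs out) := by unfold Spec_generate_feature; infer_instance

-- ===== CLAIM (what is proved, stated in full; the proofs are below) =====
def Claim_equal_generate_feature : Prop := ∀ (pairs : List (String × String × String)), Dom_generate_feature pairs → Spec_generate_feature pairs (generate_feature pairs)

-- ===== LEMMAS AND PROOFS =====

-- ===== VERDICT (by name: the statement is the Claim_ definition above) =====
theorem generate_feature_spec : Claim_equal_generate_feature := by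
  intro pairs _
  unfold Spec_generate_feature
  simp only [generate_feature, generate_feature_alt]
  -- items of the grouping dict
  have hkeys : (pairs.foldl (fun d t => d.modify t.1 [] (· ++ [t.2]))
      (PySem.Dict.empty : PySem.Dict String (List (String × String)))).keys
      = PySem.Set.ofList (pairs.map (fun t => t.1)) := by
    rw [PySem.Dict.keys_foldl_modify_key]
    rfl
  have hnd : (pairs.foldl (fun d t => d.modify t.1 [] (· ++ [t.2]))
      (PySem.Dict.empty : PySem.Dict String (List (String × String)))).keys.Nodup := by
    rw [hkeys]; exact PySem.Set.nodup_ofList _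
  have hitems : (pairs.foldl (fun d t => d.modify t.1 [] (· ++ [t.2]))
      (PySem.Dict.empty : PySem.Dict String (List (String × String)))).items
      = (PySem.Set.ofList (pairs.map (fun t => t.1))).map
          (fun k => (k, (pairs.filter (fun t => t.1 == k)).map (fun t => t.2))) := by
    rw [PySem.Dict.items_eq_map_keys _ hnd []]
    rw [hkeys]
    refine List.map_congr_left (fun k _ => ?_)
    rw [PySem.Dict.getD_foldl_modify_append]
    rfl
  rw [hitems]
  have hsorted : PySem.List.sorted ((PySem.Set.ofList (pairs.map (fun t => t.1))).map
          (fun k => (k, (pairs.filter (fun t => t.1 == k)).map (fun t => t.2)))) (fun kv => kv.1) false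
      = (PySem.List.sorted (PySem.Set.ofList (pairs.map (fun t => t.1))) (fun x => x) false).map
          (fun k => (k, (pairs.filter (fun t => t.1 == k)).map (fun t => t.2))) := by
    apply PySem.List.sorted_eq_of_perm_of_pairwise_lt
    · exact (PySem.List.sorted_perm _ _ _).map _
    · rw [List.pairwise_map]
      exact PySem.List.sorted_ofList_pairwise_lt _
  rw [hsorted]
  rw [PySem.List.foldl_append_eq_flatMap]
  rw [List.flatMap_map]
  congr 1
  congr 1
  congr 1
  funext k
  simp [List.map_map, Function.comp_def, List.countP_eq_length_filter]
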